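-- pv_equiv track=rewrite | github.com/thandrangiashok/codemind-python | value_same_as_count.py | count_elements_with_condition
-- ===== SOURCE A (Python) =====
-- def count_elements_with_condition(arr):
--     count_dict = {}
--     count = 0
--
--     for num in arr:
--         if num in count_dict:
--             count_dict[num] += 1
--         else:
--             count_dict[num] = 1
--
--     for num, freq in count_dict.items():
--         if num == freq:
--             count += 1
--
--     return count
-- ===== SOURCE B (Python) =====
-- def count_elements_with_condition(arr):
--     # Sort a copy, then scan runs of equal values; a value matches when it
--     # equals its run length. No dictionary is used.
--     s = sorted(arr)
--     count = 0
--     i = 0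
--     n = len(s)
--     while i < n:
--         v = s[i]
--         run = 1
--         i += 1
--         while i < n and s[i] == v:
--             run += 1
--             i += 1
--         if v == run:
--             count += 1
--     return count
-- ===== Notes on version B (the rewrite author's own statement) =====
-- stated objective: alternative
-- what changed: Replaces the frequency dictionary plus items scan with sorting a copy and a single run-length pass over the sorted list, counting runs whose value equals their length.
import Mathlib
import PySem

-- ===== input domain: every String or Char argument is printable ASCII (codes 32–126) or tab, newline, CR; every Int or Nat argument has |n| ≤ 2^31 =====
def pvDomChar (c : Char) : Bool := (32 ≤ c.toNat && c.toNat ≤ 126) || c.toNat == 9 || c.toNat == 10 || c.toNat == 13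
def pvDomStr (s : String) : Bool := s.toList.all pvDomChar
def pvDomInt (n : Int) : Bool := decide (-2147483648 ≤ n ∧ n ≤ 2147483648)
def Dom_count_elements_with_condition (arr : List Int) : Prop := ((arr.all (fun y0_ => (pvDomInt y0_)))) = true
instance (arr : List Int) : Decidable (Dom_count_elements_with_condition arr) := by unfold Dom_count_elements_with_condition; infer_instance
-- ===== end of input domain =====

-- B replaces A's frequency dictionary with sort-then-run-length-scan grouping (alternative algorithm, same return value).


-- ===== PORT A =====
def count_elements_with_condition (arr : List Int) : Int :=
  let count_dict := arr.foldl
    (fun d num => if d.contains num then d.insert num (d.getD num 0 + 1) else d.insert num 1)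
    PySem.Dict.empty
  count_dict.items.foldl (fun count p => if p.1 == p.2 then count + 1 else count) (0 : Int)

-- ===== PORT B =====
-- the outer while loop of Source B: each step consumes one run of equal values from the sorted list
def pvRunScan : List Int → Int
  | [] => 0
  | v :: rest =>
      (if v == 1 + ((rest.takeWhile (fun x => x == v)).length : Int) then 1 else 0)
      + pvRunScan (rest.dropWhile (fun x => x == v))
termination_by s => s.length
decreasing_by
  exact Nat.lt_succ_of_le (List.dropWhile_sublist _).length_le

def count_elements_with_condition_alt (arr : List Int) : Int :=
  pvRunScan (PySem.List.sorted arr (fun x => x) false)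

-- ===== PRECONDITION & SPEC =====
def Spec_count_elements_with_condition (arr : List Int) (out : Int) : Prop := out = count_elements_with_condition_alt arr
instance (arr : List Int) (out : Int) : Decidable (Spec_count_elements_with_condition arr out) := by unfold Spec_count_elements_with_condition; infer_instance

-- ===== CLAIM (what is proved, stated in full; the proofs are below) =====
def Claim_equal_count_elements_with_condition : Prop := ∀ (arr : List Int), Dom_count_elements_with_condition arr → Spec_count_elements_with_condition arr (count_elements_with_condition arr)

-- ===== LEMMAS AND PROOFS =====

-- two Nodup lists with the same members have the same countP
theorem pv_countP_eq_of_mem_iff {l₁ l₂ : List Int} (p : Int → Bool)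
    (h₁ : l₁.Nodup) (h₂ : l₂.Nodup) (hm : ∀ a, a ∈ l₁ ↔ a ∈ l₂) :
    l₁.countP p = l₂.countP p :=
  ((List.perm_ext_iff_of_nodup h₁ h₂).mpr hm).countP_eq p

theorem pv_A_eq (arr : List Int) :
    count_elements_with_condition arr
      = (((PySem.Set.ofList arr).countP (fun k => k == (arr.count k : Int)) : Nat) : Int) := by
  have hd : arr.foldl
      (fun (d : PySem.Dict Int Int) num =>
        if d.contains num then d.insert num (d.getD num 0 + 1) else d.insert num 1)
      PySem.Dict.empty = PySem.Dict.counter arr := by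
    rw [← PySem.Dict.foldl_insert_getD_add_one_eq_counter]
    refine PySem.List.foldl_congr_mem arr _ _ _ ?_
    intro d x _
    by_cases h : d.contains x = true
    · simp [h]
    · simp only [Bool.not_eq_true] at h
      simp [h, PySem.Dict.getD_of_not_contains d 0 h]
  unfold count_elements_with_condition
  rw [hd]
  show List.foldl (fun count p => if (p.1 == p.2) = true then count + 1 else count) 0
      (PySem.Dict.counter arr).items = _
  rw [PySem.Dict.items_counter]
  simp only [PySem.List.foldl_if_add_one]
  rw [List.countP_map]
  rw [zero_add]; rfl


theorem pv_runScan_eq (s : List Int) (hs : s.Pairwise (· ≤ ·)) :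
    pvRunScan s = ((s.dedup.countP (fun k => k == (s.count k : Int)) : Nat) : Int) := by
  induction s using pvRunScan.induct with
  | case1 => simp [pvRunScan]
  | case2 v rest ih =>
    set pre := rest.takeWhile (fun x => x == v) with hpre
    set post := rest.dropWhile (fun x => x == v) with hpost
    have hrest : pre ++ post = rest := List.takeWhile_append_dropWhile
    have hprev : ∀ x ∈ pre, x = v := fun x hx => by
      simpa [beq_iff_eq] using List.mem_takeWhile_imp hx
    have hpostgt : ∀ x ∈ post, v < x := by
      cases hp : post with
      | nil => simp
      | cons h t =>
        intro x hx
        have hh : (h == v) = false := by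
          have := List.head?_dropWhile_not (fun x => x == v) rest
          rw [← hpost, hp] at this
          exact this
        have hhpost : h ∈ post := by rw [hp]; exact List.mem_cons_self
        have hhrest : h ∈ rest := hrest ▸ List.mem_append_right pre hhpost
        have hvh : v < h := lt_of_le_of_ne ((List.pairwise_cons.mp hs).1 h hhrest)
          (fun e => by simp [e.symm] at hh)
        rcases List.mem_cons.mp hx with rfl | hxt
        · exact hvh
        · have hpp : (h :: t).Pairwise (· ≤ ·) :=
            (hp ▸ List.Pairwise.sublist (List.dropWhile_sublist (l := rest) (fun x => x == v))
              (List.pairwise_cons.mp hs).2)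
          exact lt_of_lt_of_le hvh ((List.pairwise_cons.mp hpp).1 x hxt)
    have hvnotpost : v ∉ post := fun h => lt_irrefl v (hpostgt v h)
    have hcountpre : pre.count v = pre.length :=
      List.count_eq_length.mpr (fun b hb => (hprev b hb).symm)
    have hcountv : (v :: rest).count v = 1 + pre.length := by
      rw [List.count_cons, ← hrest, List.count_append, hcountpre,
        List.count_eq_zero.mpr hvnotpost]
      simp [Nat.add_comm]
    have hcountk : ∀ k ∈ post, (v :: rest).count k = post.count k := by
      intro k hk
      have hkv : v ≠ k := ne_of_lt (hpostgt k hk)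
      have : pre.count k = 0 := List.count_eq_zero.mpr
        (fun hkpre => hkv ((hprev k hkpre).symm ▸ rfl))
      rw [List.count_cons, ← hrest, List.count_append, this]
      simp [beq_iff_eq, hkv]
    have hpairpost : post.Pairwise (· ≤ ·) := by
      rw [hpost]
      exact List.Pairwise.sublist (List.dropWhile_sublist _) (List.pairwise_cons.mp hs).2
    have ih' := ih hpairpost
    have hnodup' : (v :: post.dedup).Nodup :=
      List.nodup_cons.mpr ⟨fun h => hvnotpost (List.mem_dedup.mp h), List.nodup_dedup _⟩
    have hset : (v :: rest).dedup.countP (fun k => k == ((v :: rest).count k : Int))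
        = (v :: post.dedup).countP (fun k => k == ((v :: rest).count k : Int)) := by
      refine pv_countP_eq_of_mem_iff _ (List.nodup_dedup _) hnodup' (fun a => ?_)
      simp only [List.mem_dedup, List.mem_cons, ← hrest, List.mem_append]
      constructor
      · rintro (rfl | hpre' | hpost')
        · exact Or.inl rfl
        · exact Or.inl (hprev _ hpre')
        · exact Or.inr hpost'
      · rintro (rfl | h)
        · exact Or.inl rfl
        · exact Or.inr (Or.inr h)
    have htail : post.dedup.countP (fun k => k == ((v :: rest).count k : Int))
        = post.dedup.countP (fun k => k == (post.count k : Int)) := by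
      refine List.countP_congr (fun k hk => ?_)
      rw [hcountk k (List.mem_dedup.mp hk)]
    have hcond : (v == 1 + ((pre.length : Nat) : Int)) = (v == (((v :: rest).count v : Nat) : Int)) := by
      rw [hcountv]; push_cast; ring_nf
    rw [pvRunScan, ih', hset, List.countP_cons, htail, hcond]
    push_cast
    split_ifs <;> omega


-- ===== VERDICT (by name: the statement is the Claim_ definition above) =====
theorem count_elements_with_condition_spec : Claim_equal_count_elements_with_condition := by
  intro arr _
  unfold Spec_count_elements_with_condition count_elements_with_condition_alt
  rw [pv_A_eq, pv_runScan_eq _ (by simpa using PySem.List.sorted_pairwise arr (fun x => x))]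
  congr 1
  have hperm := PySem.List.sorted_perm arr (fun x => x) false
  calc (PySem.Set.ofList arr).countP (fun k => k == (arr.count k : Int))
      = (PySem.List.sorted arr (fun x => x) false).dedup.countP (fun k => k == (arr.count k : Int)) := by
        refine pv_countP_eq_of_mem_iff _ (PySem.Set.nodup_ofList arr) (List.nodup_dedup _) (fun a => ?_)
        rw [PySem.Set.mem_ofList, List.mem_dedup, hperm.mem_iff]
    _ = _ := by
        refine List.countP_congr (fun a _ => ?_)
        rw [hperm.count_eq]
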